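-- pv_equiv track=rewrite | github.com/kookmin-sw/2026-capstone-11 | RL_AI/SeaEngine/experiment.py | _format_plan_counts
-- ===== SOURCE A (Python) =====
-- from collections import Counter
--
-- def _format_plan_counts(counts: Counter[str]) -> str:
--     if not counts:
--         return "-"
--     parts = []
--     for key in ("random", "greedy"):
--         if key in counts:
--             parts.append(f"{key}={counts[key]}")
--     for key in sorted(k for k in counts.keys() if k not in {"random", "greedy"}):
--         parts.append(f"{key}={counts[key]}")
--     return ", ".join(parts)
-- ===== SOURCE B (Python) =====
-- from collections import Counter
--
-- def _format_plan_counts(counts: Counter[str]) -> str: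
--     if not counts:
--         return "-"
--     order = sorted(
--         counts.keys(),
--         key=lambda k: ("0" if k == "random" else "1" if k == "greedy" else "2") + k,
--     )
--     return ", ".join(f"{k}={counts[k]}" for k in order)
-- ===== Notes on version B (the rewrite author's own statement) =====
-- stated objective: simpler
-- what changed: Replaces the two-phase construction (a fixed-key loop over the two priority keys followed by a second loop over the sorted remaining keys) with one sorted pass over all keys under a composite priority-prefix sort key, formatting everything in a single comprehension.
import Mathlib
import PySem

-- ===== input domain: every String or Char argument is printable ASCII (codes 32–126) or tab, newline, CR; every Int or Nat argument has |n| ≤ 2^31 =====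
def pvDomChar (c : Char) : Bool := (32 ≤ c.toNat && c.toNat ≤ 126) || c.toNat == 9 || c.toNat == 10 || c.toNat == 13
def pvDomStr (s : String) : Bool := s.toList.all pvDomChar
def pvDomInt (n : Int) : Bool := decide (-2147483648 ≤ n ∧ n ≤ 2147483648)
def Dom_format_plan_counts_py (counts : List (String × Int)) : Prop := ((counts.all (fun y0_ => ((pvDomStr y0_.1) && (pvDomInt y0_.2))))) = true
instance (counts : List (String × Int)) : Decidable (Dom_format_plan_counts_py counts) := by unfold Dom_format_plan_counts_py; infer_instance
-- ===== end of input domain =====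

-- B replaces A's two-phase build (fixed-key loop, then sorted remainder loop) with one
-- sorted pass over all keys under a composite priority-prefix key (objective: simpler).


-- ===== PORT A =====
-- f"{key}={counts[key]}" (shared by both Pythons verbatim)
def pvFmt (d : PySem.Dict String Int) (key : String) : String :=
  key ++ "=" ++ PySem.Int.toStr (d.getD key 0)

-- 'k not in {"random", "greedy"}' in A's generator expression
def pvRestKey (k : String) : Bool := !(k == "random" || k == "greedy")

def format_plan_counts_py (counts : List (String × Int)) : String :=
  let d := PySem.Dict.ofList counts
  if counts = [] then "-"
  else
    let parts := (["random", "greedy"] : List String).foldl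
      (fun parts key => if d.contains key then parts ++ [pvFmt d key] else parts) []
    let parts := (PySem.List.sorted (d.keys.filter pvRestKey) (fun k => k)).foldl
      (fun parts key => parts ++ [pvFmt d key]) parts
    PySem.Str.join ", " parts

-- ===== PORT B =====
-- the composite sort key ("0"|"1"|"2") + k
def pvPrio (k : String) : String :=
  (if k == "random" then "0" else if k == "greedy" then "1" else "2") ++ k

def format_plan_counts_py_alt (counts : List (String × Int)) : String :=
  let d := PySem.Dict.ofList counts
  if counts = [] then "-"
  else PySem.Str.join ", " ((PySem.List.sorted d.keys pvPrio).map (fun k => pvFmt d k))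

-- ===== PRECONDITION & SPEC =====
def Spec_format_plan_counts_py (counts : List (String × Int)) (out : String) : Prop := out = format_plan_counts_py_alt counts
instance (counts : List (String × Int)) (out : String) : Decidable (Spec_format_plan_counts_py counts out) := by unfold Spec_format_plan_counts_py; infer_instance

-- ===== CLAIM (what is proved, stated in full; the proofs are below) =====
def Claim_equal_format_plan_counts_py : Prop := ∀ (counts : List (String × Int)), Dom_format_plan_counts_py counts → Spec_format_plan_counts_py counts (format_plan_counts_py counts)

-- ===== LEMMAS AND PROOFS =====

-- append-accumulator loop = map
theorem pv_foldl_snoc (f : String → String) (l : List String) (init : List String) :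
    l.foldl (fun acc x => acc ++ [f x]) init = init ++ l.map f := by
  induction l generalizing init with
  | nil => simp
  | cons x t ih => simp [List.foldl, ih, List.append_assoc]

theorem pv_str_prefix_lt (a b : String) (h : a < b) (c : String) : c ++ a < c ++ b := by
  rw [String.lt_iff_toList_lt] at *
  simpa [String.toList_append] using List.append_left_lt h

theorem pv_prio_sorted (d : PySem.Dict String Int) (hnd : d.keys.Nodup) :
    PySem.List.sorted d.keys pvPrio =
      (if "random" ∈ d.keys then ["random"] else []) ++
      (if "greedy" ∈ d.keys then ["greedy"] else []) ++
      PySem.List.sorted (d.keys.filter pvRestKey) (fun k => k) := by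
  set sr := PySem.List.sorted (d.keys.filter pvRestKey) (fun k => k) with hsrdef
  have hsp : sr.Perm (d.keys.filter pvRestKey) := PySem.List.sorted_perm _ _ _
  have hrest : ∀ x : String, pvRestKey x = true ↔ (x ≠ "random" ∧ x ≠ "greedy") := by
    intro x; simp [pvRestKey]
  have hmem : ∀ x, x ∈ sr ↔ (x ∈ d.keys ∧ x ≠ "random" ∧ x ≠ "greedy") := by
    intro x; rw [hsp.mem_iff, List.mem_filter, hrest x]
  have hprio : ∀ x ∈ sr, pvPrio x = "2" ++ x := by
    intro x hx
    rcases (hmem x).mp hx with ⟨_, h1, h2⟩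
    simp [pvPrio, h1, h2]
  have hsrnd : sr.Nodup := hsp.symm.nodup (hnd.filter _)
  have hsrlt : sr.Pairwise (fun a b => pvPrio a < pvPrio b) := by
    have hle : sr.Pairwise (fun a b : String => a ≤ b) :=
      PySem.List.sorted_pairwise (d.keys.filter pvRestKey) (fun k => k)
    refine ((hle.and hsrnd).imp_of_mem ?_)
    intro a b ha hb hab
    rw [hprio a ha, hprio b hb]
    exact pv_str_prefix_lt a b (lt_of_le_of_ne hab.1 hab.2) _
  have hrg : pvPrio "random" < pvPrio "greedy" := by
    show ("0random" : String) < "1greedy"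
    rw [String.lt_iff_toList_lt]
    exact List.lex_eq_true_iff_lt.mp rfl
  have hrs : ∀ x ∈ sr, pvPrio "random" < pvPrio x := by
    intro x hx
    rw [hprio x hx]
    show ("0random" : String) < "2" ++ x
    rw [String.lt_iff_toList_lt]
    simp only [String.toList_append]
    exact List.lex_eq_true_iff_lt.mp rfl
  have hgs : ∀ x ∈ sr, pvPrio "greedy" < pvPrio x := by
    intro x hx
    rw [hprio x hx]
    show ("1greedy" : String) < "2" ++ x
    rw [String.lt_iff_toList_lt]
    simp only [String.toList_append]
    exact List.lex_eq_true_iff_lt.mp rfl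
  have hpw : List.Pairwise (fun a b => pvPrio a < pvPrio b)
      ((if "random" ∈ d.keys then ["random"] else []) ++
       (if "greedy" ∈ d.keys then ["greedy"] else []) ++ sr) := by
    by_cases h1 : "random" ∈ d.keys <;> by_cases h2 : "greedy" ∈ d.keys <;>
      simp only [h1, h2, if_true, if_false, List.nil_append, List.append_nil,
        List.cons_append, List.pairwise_cons]
    · refine ⟨fun b hb => ?_, fun b hb => hgs b hb, hsrlt⟩
      rcases List.mem_cons.mp hb with rfl | hb2
      · exact hrg
      · exact hrs b hb2
    · exact ⟨fun b hb => hrs b hb, hsrlt⟩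
    · exact ⟨fun b hb => hgs b hb, hsrlt⟩
    · exact hsrlt
  have hysnd : ((if "random" ∈ d.keys then ["random"] else []) ++
       (if "greedy" ∈ d.keys then ["greedy"] else []) ++ sr).Nodup :=
    hpw.imp fun h heq => absurd (heq ▸ h) (lt_irrefl _)
  apply PySem.List.sorted_eq_of_perm_of_pairwise_lt _ _ _ ?_ hpw
  rw [List.perm_ext_iff_of_nodup hysnd hnd]
  intro a
  by_cases h1 : "random" ∈ d.keys <;> by_cases h2 : "greedy" ∈ d.keys <;>
    by_cases ha : a = "random" <;> by_cases hb : a = "greedy" <;>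
      simp_all

-- ===== VERDICT (by name: the statement is the Claim_ definition above) =====
theorem format_plan_counts_py_spec : Claim_equal_format_plan_counts_py := by
  intro counts _
  unfold Spec_format_plan_counts_py format_plan_counts_py format_plan_counts_py_alt
  by_cases hc : counts = []
  · simp [hc]
  · simp only [hc, if_false]
    rw [pv_prio_sorted _ (PySem.Dict.nodup_keys_ofList counts), pv_foldl_snoc]
    congr 1
    simp only [List.map_append, List.foldl_cons, List.foldl_nil]
    have hr := PySem.Dict.contains_iff_mem_keys (PySem.Dict.ofList counts) "random"
    have hg := PySem.Dict.contains_iff_mem_keys (PySem.Dict.ofList counts) "greedy"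
    by_cases h1 : "random" ∈ (PySem.Dict.ofList counts).keys <;>
      by_cases h2 : "greedy" ∈ (PySem.Dict.ofList counts).keys <;>
        simp_all
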